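-- pv_equiv track=rewrite | github.com/adriencondam/fusedpkg | src/fusedpkg/glm/penalized.py | _group_onehot_columns_by_variable
-- ===== SOURCE A (Python) =====
-- from typing import Dict, List, Sequence, Tuple
--
-- def _group_onehot_columns_by_variable(
--     input_var_onehot: Sequence[str],
--     penalty_types: Dict[str, str],
-- ) -> Dict[str, List[int]]:
--     grouped_columns: Dict[str, List[int]] = {}
--     for variable in penalty_types:
--         indices = [index for index, column in enumerate(input_var_onehot) if column.startswith(f"{variable}_")]
--         if indices:
--             grouped_columns[variable] = indices
--     return grouped_columns
-- ===== SOURCE B (Python) =====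
-- from typing import Dict, List, Sequence, Tuple
--
-- def _group_onehot_columns_by_variable(
--     input_var_onehot: Sequence[str],
--     penalty_types: Dict[str, str],
-- ) -> Dict[str, List[int]]:
--     # One pass over the columns: every underscore position of a column names a
--     # candidate variable prefix; bucket the column index under that prefix.
--     by_prefix: Dict[str, List[int]] = {}
--     for index, column in enumerate(input_var_onehot):
--         for pos, ch in enumerate(column):
--             if ch == '_':
--                 by_prefix.setdefault(column[:pos], []).append(index)
--     return {v: by_prefix[v] for v in penalty_types if v in by_prefix}
-- ===== Notes on version B (the rewrite author's own statement) =====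
-- stated objective: faster
-- what changed: Instead of scanning all columns once per penalty variable, B makes one pass over the columns, bucketing each column index under every underscore-prefix of the column in a dictionary, then emits the penalty keys that occur as prefixes in key order.
import Mathlib
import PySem

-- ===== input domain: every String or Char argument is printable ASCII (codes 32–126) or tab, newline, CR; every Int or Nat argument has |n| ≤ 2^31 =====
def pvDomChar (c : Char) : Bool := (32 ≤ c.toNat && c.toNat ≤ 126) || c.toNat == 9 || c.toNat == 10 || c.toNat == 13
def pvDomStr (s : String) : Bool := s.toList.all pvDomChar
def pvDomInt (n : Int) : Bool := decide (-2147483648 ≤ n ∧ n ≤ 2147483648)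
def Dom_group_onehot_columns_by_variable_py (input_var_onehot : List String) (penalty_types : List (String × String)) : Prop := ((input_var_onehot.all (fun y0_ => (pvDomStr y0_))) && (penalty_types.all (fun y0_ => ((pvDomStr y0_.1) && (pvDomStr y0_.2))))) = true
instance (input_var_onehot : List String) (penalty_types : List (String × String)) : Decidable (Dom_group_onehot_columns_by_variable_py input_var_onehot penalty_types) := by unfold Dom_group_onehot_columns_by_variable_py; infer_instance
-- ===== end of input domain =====

-- B replaces A's per-variable scan of all columns by a single pass over the columns that
-- buckets each column index under every underscore-prefix in a dictionary (objective: faster).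


-- ===== PORT A =====
-- Python dict iteration = the distinct keys in insertion order (dedup of first components).
def group_onehot_columns_by_variable_py (input_var_onehot : List String) (penalty_types : List (String × String)) : List (String × List Int) :=
  ((PySem.List.dedup (penalty_types.map (·.1))).foldl
    (fun (d : PySem.Dict String (List Int)) v =>
      let indices : List Int :=
        ((PySem.List.enumerate input_var_onehot).filter
          (fun p => PySem.Str.startswith p.2 (v ++ "_"))).map (·.1)
      if indices = [] then d else d.insert v indices)
    PySem.Dict.empty).items


-- ===== PORT B =====
-- Port of B: one pass over the columns; every underscore position of a column buckets the
-- column index under the prefix before it (setdefault(...).append = Dict.modify with default []);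
-- then the distinct penalty keys that occur as prefixes are emitted in key order.
-- Strings are handled as their char lists (Python iterates the string's characters).
def group_onehot_columns_by_variable_py_alt (input_var_onehot : List String) (penalty_types : List (String × String)) : List (String × List Int) :=
  let byPrefix : PySem.Dict (List Char) (List Int) :=
    (PySem.List.enumerate input_var_onehot).foldl
      (fun d ic =>
        (PySem.List.enumerate ic.2.toList).foldl
          (fun d q =>
            if q.2 == '_' then
              d.modify (PySem.List.slice ic.2.toList none (some q.1)) [] (fun xs => xs ++ [ic.1])
            else d)
          d)
      PySem.Dict.empty
  ((PySem.List.dedup (penalty_types.map (·.1))).foldl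
    (fun (d : PySem.Dict String (List Int)) v =>
      if byPrefix.contains v.toList then d.insert v (byPrefix.getD v.toList []) else d)
    PySem.Dict.empty).items


-- ===== PRECONDITION & SPEC =====
def Spec_group_onehot_columns_by_variable_py (input_var_onehot : List String) (penalty_types : List (String × String)) (out : List (String × List Int)) : Prop := out = group_onehot_columns_by_variable_py_alt input_var_onehot penalty_types
instance (input_var_onehot : List String) (penalty_types : List (String × String)) (out : List (String × List Int)) : Decidable (Spec_group_onehot_columns_by_variable_py input_var_onehot penalty_types out) := by unfold Spec_group_onehot_columns_by_variable_py; infer_instance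

-- ===== CLAIM (what is proved, stated in full; the proofs are below) =====
def Claim_equal_group_onehot_columns_by_variable_py : Prop := ∀ (input_var_onehot : List String) (penalty_types : List (String × String)), Dom_group_onehot_columns_by_variable_py input_var_onehot penalty_types → Spec_group_onehot_columns_by_variable_py input_var_onehot penalty_types (group_onehot_columns_by_variable_py input_var_onehot penalty_types)

-- ===== LEMMAS AND PROOFS =====


-- A's per-variable index list (the comprehension in A), used only by the proofs below.
def pvIndicesA (cols : List String) (v : String) : List Int :=
  ((PySem.List.enumerate cols).filter (fun p => PySem.Str.startswith p.2 (v ++ "_"))).map (·.1)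

-- The (prefix, index) pairs B's nested loop feeds into the dictionary, flattened.
def pvPairs (cols : List String) : List (List Char × Int) :=
  (PySem.List.enumerate cols).flatMap (fun ic =>
    (((PySem.List.enumerate ic.2.toList).filter (fun q => q.2 == '_')).map
      (fun q => (PySem.List.slice ic.2.toList none (some q.1), ic.1))))

lemma pv_enum_shift {α : Type} (xs : List α) (s : Int) :
    PySem.List.enumerate xs s = (PySem.List.enumerate xs 0).map (fun p => (p.1 + s, p.2)) := by
  induction xs generalizing s with
  | nil => simp [PySem.List.enumerate]
  | cons x xs ih =>
    rw [PySem.List.enumerate_cons, PySem.List.enumerate_cons, ih (s+1)]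
    have h1 : PySem.List.enumerate xs (0+1) = (PySem.List.enumerate xs 0).map (fun p => (p.1 + 1, p.2)) := by
      rw [show ((0:Int)+1) = 1 by norm_num, ih 1]
    rw [h1]
    simp only [List.map_cons, List.map_map]
    refine congrArg₂ List.cons (by simp) ?_
    apply List.map_congr_left; intro p _; simp [Function.comp]; omega

lemma pv_KL (cs vl : List Char) :
    (PySem.List.enumerate cs).filter (fun q => q.2 == '_' && (PySem.List.slice cs none (some q.1) == vl))
      = if vl ++ ['_'] <+: cs then [((vl.length : Int), '_')] else [] := by
  induction cs generalizing vl with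
  | nil => simp [PySem.List.enumerate]
  | cons c cs ih =>
    rw [PySem.List.enumerate_cons, show ((0:Int)+1) = 1 by norm_num, pv_enum_shift cs 1]
    rw [List.filter_cons, List.filter_map]
    have htail : ∀ q ∈ PySem.List.enumerate cs,
        ((fun q : Int × Char => q.2 == '_' && (PySem.List.slice (c :: cs) none (some q.1) == vl)) ∘ (fun p : Int × Char => (p.1 + 1, p.2))) q
        = (fun q : Int × Char => q.2 == '_' && (c :: PySem.List.slice cs none (some q.1) == vl)) q := by
      intro q hq
      rcases (PySem.List.mem_enumerate_iff cs 0 q).mp hq with ⟨k, hk, rfl⟩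
      simp only [Function.comp_apply, zero_add]
      have h0 : (0:Int) ≤ (k:Int) := Int.natCast_nonneg k
      rw [PySem.List.slice_to _ (by omega : (0:Int) ≤ (k:Int)+1), PySem.List.slice_to _ h0]
      have ht : ((k:Int) + 1).toNat = (k:Int).toNat + 1 := by omega
      rw [ht, List.take_succ_cons]
    rw [List.filter_congr htail]
    simp only [] -- head condition
    rcases vl with _ | ⟨a, vl'⟩
    · -- vl = []
      have : (fun q : Int × Char => q.2 == '_' && (c :: PySem.List.slice cs none (some q.1) == ([] : List Char))) = fun _ => false := by
        funext q; simp
      rw [this, List.filter_false]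
      by_cases hc : c = '_'
      · subst hc
        simp [PySem.List.slice_to _ (le_refl (0:Int))]
      · have : (c == '_' && (PySem.List.slice (c :: cs) none (some (0:Int)) == ([] : List Char))) = false := by
          simp [hc]
        rw [this]
        simp [List.cons_prefix_cons, eq_comm, hc]
    · -- vl = a :: vl'
      have hhead : (((0:Int), c).2 == '_' && (PySem.List.slice (c :: cs) none (some ((0:Int), c).1) == (a :: vl'))) = false := by
        rw [PySem.List.slice_to _ (le_refl (0:Int))]
        simp
      rw [hhead]
      simp only [Bool.false_eq_true, if_false]
      by_cases hca : c = a
      · subst hca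
        have : (fun q : Int × Char => q.2 == '_' && (c :: PySem.List.slice cs none (some q.1) == (c :: vl'))) =
            (fun q : Int × Char => q.2 == '_' && (PySem.List.slice cs none (some q.1) == vl')) := by
          funext q; simp
        rw [this, ih vl']
        by_cases hp : vl' ++ ['_'] <+: cs
        · rw [if_pos hp, if_pos (by simpa [List.cons_prefix_cons] using hp)]
          simp
        · rw [if_neg hp, if_neg (by simp [List.cons_prefix_cons, hp])]
          simp
      · have : (fun q : Int × Char => q.2 == '_' && (c :: PySem.List.slice cs none (some q.1) == (a :: vl'))) = fun _ => false := by
          funext q; simp [hca]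
        rw [this, List.filter_false]
        rw [if_neg (by simp [List.cons_prefix_cons]; exact fun h => absurd h.symm hca)]
        simp

-- B's nested dictionary loop is the flat fold over pvPairs.
lemma pv_byPrefix_eq (cols : List String) :
    ((PySem.List.enumerate cols).foldl
      (fun d ic =>
        (PySem.List.enumerate ic.2.toList).foldl
          (fun d q =>
            if q.2 == '_' then
              d.modify (PySem.List.slice ic.2.toList none (some q.1)) [] (fun xs => xs ++ [ic.1])
            else d)
          d)
      (PySem.Dict.empty : PySem.Dict (List Char) (List Int)))
    = (pvPairs cols).foldl (fun d p => d.modify p.1 [] (fun xs => xs ++ [p.2])) PySem.Dict.empty := by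
  rw [pvPairs, List.foldl_flatMap]
  congr 1
  funext d ic
  rw [List.foldl_map, List.foldl_filter]

lemma pv_filter_pairs (cols : List String) (v : String) :
    ((pvPairs cols).filter (fun p => p.1 == v.toList)).map (·.2) = pvIndicesA cols v := by
  rw [pvPairs, pvIndicesA, List.filter_flatMap, List.map_flatMap]
  have hfm : ∀ (l : List (Int × String)) (p : Int × String → Bool) (f : Int × String → Int),
      (l.filter p).map f = l.flatMap (fun x => if p x then [f x] else []) := by
    intro l p f
    induction l with
    | nil => simp
    | cons x xs ih => by_cases h : p x <;> simp [h, ih]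
  rw [hfm]
  congr 1
  funext ic
  rw [List.filter_map, List.map_map]
  have hcomp : ((fun p : List Char × Int => p.1 == v.toList) ∘
      (fun q : Int × Char => (PySem.List.slice ic.2.toList none (some q.1), ic.1)))
      = fun q : Int × Char => (PySem.List.slice ic.2.toList none (some q.1) == v.toList) := rfl
  rw [hcomp, List.filter_filter]
  have hand : (fun q : Int × Char => (PySem.List.slice ic.2.toList none (some q.1) == v.toList) && (q.2 == '_'))
      = fun q : Int × Char => q.2 == '_' && (PySem.List.slice ic.2.toList none (some q.1) == v.toList) := by
    funext q; rw [Bool.and_comm]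
  rw [hand, pv_KL]
  by_cases h : v.toList ++ ['_'] <+: ic.2.toList
  · rw [if_pos h, if_pos]
    · rfl
    · rw [PySem.Str.startswith_eq, PySem.Chars.startswith_iff]
      simpa using h
  · rw [if_neg h, if_neg]
    · rfl
    · rw [PySem.Str.startswith_eq]
      simp only [Bool.not_eq_true]
      rw [← Bool.not_eq_true, PySem.Chars.startswith_iff]
      simpa using h

lemma pv_getD (cols : List String) (v : String) :
    ((pvPairs cols).foldl (fun d p => d.modify p.1 [] (fun xs => xs ++ [p.2]))
      (PySem.Dict.empty : PySem.Dict (List Char) (List Int))).getD v.toList [] = pvIndicesA cols v := by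
  rw [PySem.Dict.getD_foldl_modify_append, pv_filter_pairs]
  simp [PySem.Dict.getD_empty]

lemma pv_contains (cols : List String) (v : String) :
    ((pvPairs cols).foldl (fun d p => d.modify p.1 [] (fun xs => xs ++ [p.2]))
      (PySem.Dict.empty : PySem.Dict (List Char) (List Int))).contains v.toList
      = true ↔ pvIndicesA cols v ≠ [] := by
  rw [PySem.Dict.contains_iff_mem_keys]
  simp only [PySem.Dict.keys_foldl_modify_key, PySem.Dict.keys_empty]
  rw [show PySem.Set.update ([] : PySem.Set (List Char)) ((pvPairs cols).map (·.1)) = PySem.Set.ofList ((pvPairs cols).map (·.1)) from (PySem.Set.ofList_eq_foldl _)]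
  rw [PySem.Set.mem_ofList]
  rw [← pv_filter_pairs cols v]
  simp only [List.map_eq_nil_iff, ne_eq, List.filter_eq_nil_iff]
  constructor
  · rintro h hall
    rcases List.mem_map.mp h with ⟨p, hp, hpe⟩
    have hb := hall p hp
    simp only [beq_iff_eq] at hb
    exact hb hpe
  · intro h
    by_contra hnm
    apply h
    intro p hp
    simp only [beq_iff_eq]
    intro hpe
    exact hnm (List.mem_map.mpr ⟨p, hp, hpe⟩)

lemma pv_containsBool (cols : List String) (v : String) :
    ((pvPairs cols).foldl (fun d p => d.modify p.1 [] (fun xs => xs ++ [p.2]))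
      (PySem.Dict.empty : PySem.Dict (List Char) (List Int))).contains v.toList
      = decide (pvIndicesA cols v ≠ []) := by
  rw [Bool.eq_iff_iff, decide_eq_true_iff]
  exact pv_contains cols v

-- ===== VERDICT (by name: the statement is the Claim_ definition above) =====
theorem group_onehot_columns_by_variable_py_spec : Claim_equal_group_onehot_columns_by_variable_py := by
  intro cols pts _
  unfold Spec_group_onehot_columns_by_variable_py
  unfold group_onehot_columns_by_variable_py group_onehot_columns_by_variable_py_alt
  simp only [pv_byPrefix_eq, pv_getD, pv_containsBool]
  congr 2
  funext d v
  show (if pvIndicesA cols v = [] then d else d.insert v (pvIndicesA cols v))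
      = (if decide (pvIndicesA cols v ≠ []) = true then d.insert v (pvIndicesA cols v) else d)
  by_cases h : pvIndicesA cols v = [] <;> simp [h]
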